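-- pv_equiv track=rewrite | github.com/HuynhTriNhan/MONICE | MONICE_experiments/binary/dice_ml_x/explainer_interfaces/dice_tensorflow2.py | _get_ohe_groups
-- ===== SOURCE A (Python) =====
-- from collections import defaultdict
--
-- def _get_ohe_groups(cat_col_names: list[str], ohe_col_names: list[str]):
--     groups = defaultdict(list)
--
--     for i, col in enumerate(ohe_col_names):
--         for cat in cat_col_names:
--             if col.startswith(cat + "_"):
--                 groups[cat].append(i)
--                 break
--     return [groups[c] for c in cat_col_names]
-- ===== SOURCE B (Python) =====
-- def _get_ohe_groups(cat_col_names: list[str], ohe_col_names: list[str]):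
--     assigned = set()
--     groups = {}
--     for cat in cat_col_names:
--         if cat in groups:
--             continue
--         idxs = [i for i, col in enumerate(ohe_col_names)
--                 if i not in assigned and col.startswith(cat + "_")]
--         assigned.update(idxs)
--         groups[cat] = idxs
--     return [groups[c] for c in cat_col_names]
-- ===== Notes on version B (the rewrite author's own statement) =====
-- stated objective: alternative
-- what changed: B inverts the loop nesting: instead of A's per-column inner scan for the first matching category (for/break into a defaultdict), B loops over categories once, collecting for each not-yet-seen category the still-unclaimed column indices whose name starts with that prefix and marking them in an assigned set.
import Mathlib
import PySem

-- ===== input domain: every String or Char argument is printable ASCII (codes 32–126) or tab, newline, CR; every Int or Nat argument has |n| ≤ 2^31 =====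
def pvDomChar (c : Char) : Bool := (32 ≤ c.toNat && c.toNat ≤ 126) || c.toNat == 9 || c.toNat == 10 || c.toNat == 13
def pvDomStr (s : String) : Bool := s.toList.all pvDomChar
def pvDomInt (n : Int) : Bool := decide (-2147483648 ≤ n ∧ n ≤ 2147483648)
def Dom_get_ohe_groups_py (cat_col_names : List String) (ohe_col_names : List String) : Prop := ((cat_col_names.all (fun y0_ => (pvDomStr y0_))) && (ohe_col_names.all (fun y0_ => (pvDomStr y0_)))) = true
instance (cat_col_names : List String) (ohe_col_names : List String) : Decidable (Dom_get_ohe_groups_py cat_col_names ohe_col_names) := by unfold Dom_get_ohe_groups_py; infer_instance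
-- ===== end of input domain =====

-- B groups by looping over categories (with a claimed-index set) instead of per-column first-match; objective: alternative decomposition, return value identical.

-- ===== PORT A =====
-- loop body of A: for each (i, col), append i to the group of the first matching category (the inner for/break)
def oheStepA (cat_col_names : List String) (g : PySem.Dict String (List Int)) (p : Int × String) : PySem.Dict String (List Int) :=
  match cat_col_names.find? (fun cat => PySem.Str.startswith p.2 (cat ++ "_")) with
  | some cat => g.modify cat [] (fun l => l ++ [p.1])
  | none => g

def get_ohe_groups_py (cat_col_names : List String) (ohe_col_names : List String) : List (List Int) :=
  let groups := (PySem.List.enumerate ohe_col_names).foldl (oheStepA cat_col_names) PySem.Dict.empty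
  cat_col_names.map (fun c => groups.getD c [])

-- ===== PORT B =====
-- loop body of B: for each category not yet seen, collect the still-unassigned matching indices
def oheStepB (ohe_col_names : List String) (st : PySem.Set Int × PySem.Dict String (List Int)) (cat : String) : PySem.Set Int × PySem.Dict String (List Int) :=
  if st.2.contains cat then st
  else
    let idxs : List Int :=
      (PySem.List.enumerate ohe_col_names).filterMap
        (fun p => if !(PySem.Set.contains st.1 p.1) && PySem.Str.startswith p.2 (cat ++ "_") then some p.1 else none)
    (PySem.Set.update st.1 idxs, st.2.insert cat idxs)

def get_ohe_groups_py_alt (cat_col_names : List String) (ohe_col_names : List String) : List (List Int) :=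
  let st := cat_col_names.foldl (oheStepB ohe_col_names) (PySem.Set.empty, PySem.Dict.empty)
  cat_col_names.map (fun c => st.2.getD c [])

-- ===== PRECONDITION & SPEC =====
def Spec_get_ohe_groups_py (cat_col_names : List String) (ohe_col_names : List String) (out : List (List Int)) : Prop := out = get_ohe_groups_py_alt cat_col_names ohe_col_names
instance (cat_col_names : List String) (ohe_col_names : List String) (out : List (List Int)) : Decidable (Spec_get_ohe_groups_py cat_col_names ohe_col_names out) := by unfold Spec_get_ohe_groups_py; infer_instance

-- ===== CLAIM (what is proved, stated in full; the proofs are below) =====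
def Claim_equal_get_ohe_groups_py : Prop := ∀ (cat_col_names : List String) (ohe_col_names : List String), Dom_get_ohe_groups_py cat_col_names ohe_col_names → Spec_get_ohe_groups_py cat_col_names ohe_col_names (get_ohe_groups_py cat_col_names ohe_col_names)

-- ===== LEMMAS AND PROOFS =====

-- the common characterisation: index i belongs to the group of category c iff c is the FIRST category whose prefix matches column i
def oheFirst (cats : List String) (col : String) : Option String :=
  cats.find? (fun cat => PySem.Str.startswith col (cat ++ "_"))

def oheGroup (cats ohes : List String) (c : String) : List Int :=
  (PySem.List.enumerate ohes).filterMap (fun p => if oheFirst cats p.2 = some c then some p.1 else none)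

-- A's dict fold computes oheGroup
lemma foldA_getD (cats : List String) (l : List (Int × String)) (g : PySem.Dict String (List Int)) (c : String) :
    (l.foldl (oheStepA cats) g).getD c []
      = g.getD c [] ++ l.filterMap (fun p => if oheFirst cats p.2 = some c then some p.1 else none) := by
  induction l generalizing g with
  | nil => simp
  | cons p l ih =>
    simp only [List.foldl_cons, List.filterMap_cons]
    rw [ih]
    unfold oheStepA oheFirst
    cases h : List.find? (fun cat => PySem.Str.startswith p.2 (cat ++ "_")) cats with
    | none => simp
    | some cat =>
      rw [PySem.Dict.getD_modify]
      by_cases hc : c = cat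
      · subst hc; simp
      · simp [hc, Ne.symm hc]

-- two entries of enumerate with the same index are equal
lemma enum_fst_inj (ohes : List String) (p q : Int × String)
    (hp : p ∈ PySem.List.enumerate ohes 0) (hq : q ∈ PySem.List.enumerate ohes 0) (h : p.1 = q.1) : p = q := by
  rw [PySem.List.mem_enumerate_iff] at hp hq
  obtain ⟨k, hk, rfl⟩ := hp
  obtain ⟨k', hk', rfl⟩ := hq
  simp only [zero_add] at h ⊢
  have : k = k' := by exact_mod_cast h
  subst this; rfl

-- oheFirst over pre ++ c :: suf, for c ∉ pre
lemma oheFirst_eq_iff (pre suf : List String) (c col : String) (hc : c ∉ pre) :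
    oheFirst (pre ++ c :: suf) col = some c ↔
      (∀ cat ∈ pre, ¬ PySem.Str.startswith col (cat ++ "_") = true) ∧ PySem.Str.startswith col (c ++ "_") = true := by
  unfold oheFirst
  rw [List.find?_append]
  cases h : List.find? (fun cat => PySem.Str.startswith col (cat ++ "_")) pre with
  | none =>
    have hall := List.find?_eq_none.mp h
    simp only [Option.none_or]
    by_cases hm : PySem.Str.startswith col (c ++ "_") = true
    · rw [List.find?_cons_of_pos (by simpa using hm)]
      constructor
      · intro _; exact ⟨fun cat hcat => by simpa using hall cat hcat, hm⟩
      · intro _; rfl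
    · rw [List.find?_cons_of_neg (by simpa using hm)]
      constructor
      · intro hfind; exact absurd (by simpa using List.find?_some hfind) hm
      · rintro ⟨-, h2⟩; exact absurd h2 hm
  | some x =>
    have hx : x ∈ pre := List.mem_of_find?_eq_some h
    have hpx : PySem.Str.startswith col (x ++ "_") = true := by simpa using List.find?_some h
    simp only [Option.some_or, Option.some.injEq]
    constructor
    · intro hmm; exact absurd (hmm ▸ hx) hc
    · rintro ⟨h1, -⟩; exact absurd hpx (h1 x hx)

-- the invariant of B's fold over categories
lemma foldB_getD (cats ohes : List String) :
    ∀ (suf pre : List String) (st : PySem.Set Int × PySem.Dict String (List Int)),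
      cats = pre ++ suf →
      (∀ c, st.2.contains c = true ↔ c ∈ pre) →
      (∀ i : Int, i ∈ st.1 ↔ ∃ p ∈ PySem.List.enumerate ohes 0, p.1 = i ∧ ∃ cat ∈ pre, PySem.Str.startswith p.2 (cat ++ "_") = true) →
      (∀ c ∈ pre, st.2.getD c [] = oheGroup cats ohes c) →
      ∀ c, c ∈ pre ∨ c ∈ suf → (suf.foldl (oheStepB ohes) st).2.getD c [] = oheGroup cats ohes c := by
  intro suf
  induction suf with
  | nil =>
    intro pre st hcats hkeys hassigned hgetD c hcmem
    rcases hcmem with h | h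
    · simpa using hgetD c h
    · simp at h
  | cons cat suf ih =>
    intro pre st hcats hkeys hassigned hgetD c hcmem
    simp only [List.foldl_cons]
    by_cases hpre : cat ∈ pre
    · have hct : st.2.contains cat = true := (hkeys cat).mpr hpre
      have hstep : oheStepB ohes st cat = st := by unfold oheStepB; rw [if_pos hct]
      rw [hstep]
      refine ih (pre ++ [cat]) st (by simpa using hcats) ?_ ?_ ?_ c ?_
      · intro c'; rw [hkeys c']
        constructor
        · intro h; exact List.mem_append_left _ h
        · intro h
          rcases List.mem_append.mp h with h | h
          · exact h
          · rwa [List.mem_singleton.mp h]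
      · intro i; rw [hassigned i]
        constructor
        · rintro ⟨p, hp, hpi, cat', hcat', hmm⟩
          exact ⟨p, hp, hpi, cat', List.mem_append_left _ hcat', hmm⟩
        · rintro ⟨p, hp, hpi, cat', hcat', hmm⟩
          rcases List.mem_append.mp hcat' with h | h
          · exact ⟨p, hp, hpi, cat', h, hmm⟩
          · exact ⟨p, hp, hpi, cat, hpre, (List.mem_singleton.mp h) ▸ hmm⟩
      · intro c' hc'
        rcases List.mem_append.mp hc' with h | h
        · exact hgetD c' h
        · rw [List.mem_singleton.mp h]; exact hgetD cat hpre
      · rcases hcmem with h | h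
        · exact Or.inl (List.mem_append_left _ h)
        · rcases List.mem_cons.mp h with h | h
          · exact Or.inl (h ▸ List.mem_append_right _ (List.mem_singleton.mpr rfl))
          · exact Or.inr h
    · have hct : ¬ st.2.contains cat = true := fun h => hpre ((hkeys cat).mp h)
      have hcontf : ∀ i : Int, i ∉ st.1 → PySem.Set.contains st.1 i = false := by
        intro i h; simp [PySem.Set.contains, h]
      have hcontt : ∀ i : Int, PySem.Set.contains st.1 i = false → i ∉ st.1 := by
        intro i h hmem; simp [PySem.Set.contains, hmem] at h
      have hmain : ∀ p ∈ PySem.List.enumerate ohes 0,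
          (if !(PySem.Set.contains st.1 p.1) && PySem.Str.startswith p.2 (cat ++ "_") then some p.1 else none)
            = (if oheFirst cats p.2 = some cat then some p.1 else none) := by
        intro p hp
        by_cases hfirst : oheFirst cats p.2 = some cat
        · obtain ⟨hnone, hmm⟩ := (oheFirst_eq_iff pre suf cat p.2 hpre).mp (hcats ▸ hfirst)
          have hnotmem : p.1 ∉ st.1 := by
            intro hmem
            obtain ⟨q, hq, hqi, cc, hcc, hccm⟩ := (hassigned p.1).mp hmem
            have hqp : q = p := enum_fst_inj ohes q p hq hp hqi
            exact hnone cc hcc (hqp ▸ hccm)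
          have hbool : (!(PySem.Set.contains st.1 p.1) && PySem.Str.startswith p.2 (cat ++ "_")) = true := by
            rw [Bool.and_eq_true, Bool.not_eq_true']
            exact ⟨hcontf p.1 hnotmem, hmm⟩
          rw [if_pos hbool, if_pos hfirst]
        · have hbool : ¬ ((!(PySem.Set.contains st.1 p.1) && PySem.Str.startswith p.2 (cat ++ "_")) = true) := by
            intro hb
            rw [Bool.and_eq_true, Bool.not_eq_true'] at hb
            obtain ⟨hnc, hmm⟩ := hb
            have hnotmem : p.1 ∉ st.1 := hcontt p.1 hnc
            have hnone : ∀ cc ∈ pre, ¬ PySem.Str.startswith p.2 (cc ++ "_") = true := by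
              intro cc hcc hccm
              exact hnotmem ((hassigned p.1).mpr ⟨p, hp, rfl, cc, hcc, hccm⟩)
            exact hfirst (hcats ▸ ((oheFirst_eq_iff pre suf cat p.2 hpre).mpr ⟨hnone, hmm⟩))
          rw [if_neg hbool, if_neg hfirst]
      have hidxs :
          (PySem.List.enumerate ohes 0).filterMap
              (fun p => if !(PySem.Set.contains st.1 p.1) && PySem.Str.startswith p.2 (cat ++ "_") then some p.1 else none)
            = oheGroup cats ohes cat := by
        unfold oheGroup; exact List.filterMap_congr hmain
      have hstep : oheStepB ohes st cat
          = (PySem.Set.update st.1 (oheGroup cats ohes cat), st.2.insert cat (oheGroup cats ohes cat)) := by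
        unfold oheStepB
        rw [if_neg hct]
        simp only [hidxs]
      rw [hstep]
      refine ih (pre ++ [cat]) _ (by simpa using hcats) ?_ ?_ ?_ c ?_
      · intro c'
        dsimp only
        rw [PySem.Dict.contains_insert]
        simp only [Bool.or_eq_true, beq_iff_eq, List.mem_append, List.mem_singleton]
        rw [hkeys c']; tauto
      · intro i
        dsimp only
        rw [PySem.Set.mem_update]
        constructor
        · rintro (h | h)
          · obtain ⟨p, hp, hpi, cat', hcat', hmm⟩ := (hassigned i).mp h
            exact ⟨p, hp, hpi, cat', List.mem_append_left _ hcat', hmm⟩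
          · unfold oheGroup at h
            obtain ⟨p, hp, heq⟩ := List.mem_filterMap.mp h
            by_cases hfirst : oheFirst cats p.2 = some cat
            · rw [if_pos hfirst, Option.some.injEq] at heq
              have hmm : PySem.Str.startswith p.2 (cat ++ "_") = true :=
                ((oheFirst_eq_iff pre suf cat p.2 hpre).mp (hcats ▸ hfirst)).2
              exact ⟨p, hp, heq, cat, List.mem_append_right _ (List.mem_singleton.mpr rfl), hmm⟩
            · rw [if_neg hfirst] at heq; cases heq
        · rintro ⟨p, hp, hpi, cat', hcat', hmm⟩
          rcases List.mem_append.mp hcat' with hl | hr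
          · exact Or.inl ((hassigned i).mpr ⟨p, hp, hpi, cat', hl, hmm⟩)
          · have hcc : cat' = cat := List.mem_singleton.mp hr
            subst hcc
            by_cases hex : ∃ cc ∈ pre, PySem.Str.startswith p.2 (cc ++ "_") = true
            · obtain ⟨cc, h1, h2⟩ := hex
              exact Or.inl ((hassigned i).mpr ⟨p, hp, hpi, cc, h1, h2⟩)
            · right
              unfold oheGroup
              refine List.mem_filterMap.mpr ⟨p, hp, ?_⟩
              have hcond : oheFirst cats p.2 = some cat' := by
                rw [hcats]
                exact (oheFirst_eq_iff pre suf cat' p.2 hpre).mpr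
                  ⟨fun cc hcc hmm2 => hex ⟨cc, hcc, hmm2⟩, hmm⟩
              rw [if_pos hcond, hpi]
      · intro c' hc'
        dsimp only
        rcases List.mem_append.mp hc' with hl | hr
        · have hne : c' ≠ cat := fun e => hpre (e ▸ hl)
          rw [PySem.Dict.getD_insert_of_ne _ _ _ hne]
          exact hgetD c' hl
        · rw [List.mem_singleton.mp hr, PySem.Dict.getD_insert_self]
      · rcases hcmem with h | h
        · exact Or.inl (List.mem_append_left _ h)
        · rcases List.mem_cons.mp h with h | h
          · exact Or.inl (h ▸ List.mem_append_right _ (List.mem_singleton.mpr rfl))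
          · exact Or.inr h

-- ===== VERDICT (by name: the statement is the Claim_ definition above) =====
theorem get_ohe_groups_py_spec : Claim_equal_get_ohe_groups_py := by
  intro cats ohes _
  unfold Spec_get_ohe_groups_py get_ohe_groups_py get_ohe_groups_py_alt
  refine List.map_congr_left (fun c hc => ?_)
  rw [foldA_getD, PySem.Dict.getD_empty]
  rw [foldB_getD cats ohes cats [] _ rfl
        (by intro c; simp [PySem.Dict.contains_empty])
        (by intro i; simp [PySem.Set.empty])
        (by intro c hc; simp at hc)
        c (Or.inr hc)]
  rfl
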